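-- pv_equiv track=rewrite | github.com/jramaswami/Advent-Of-Code-2020 | 20/python/day20.py | search
-- ===== SOURCE A (Python) =====
-- def search(grid):
--     s1 = "                  # "
--     s2 = "#    ##    ##    ###"
--     s3 = " #  #  #  #  #  #   "
--
--     p1 = [i for i, c in enumerate(s1) if c == '#']
--     p2 = [i for i, c in enumerate(s2) if c == '#']
--     p3 = [i for i, c in enumerate(s3) if c == '#']
--
--     max_off = len(s1)
--
--     result = False
--     strings = ["".join(row) for row in grid]
--     for r, row in enumerate(grid):
--         if r + 2 > len(grid):
--             break
--         for c, _ in enumerate(row):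
--             if c + max_off > len(row):
--                 break
--
--             if (all(grid[r][c + i] == '#' for i in p1) and
--                 all(grid[r+1][c+i] == '#' for i in p2) and
--                 all(grid[r+2][c+i] == '#' for i in p3)):
--
--                 for i in p1:
--                     grid[r][c+i] = 'O'
--                 for i in p2:
--                     grid[r+1][c+i] = 'O'
--                 for i in p3:
--                     grid[r+2][c+i] = 'O'
--                 result = True
--     return result
-- ===== SOURCE B (Python) =====
-- def search(grid):
--     monster = ["                  # ",
--                "#    ##    ##    ###",
--                " #  #  #  #  #  #   "]
--
--     def bits(cells):
--         m = 0
--         for j, cell in enumerate(cells):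
--             if cell == '#':
--                 m |= 1 << j
--         return m
--
--     pat = [bits(s) for s in monster]
--     masks = [bits(row) for row in grid]
--
--     found = False
--     for r in range(len(grid) - 2):
--         for c in range(len(grid[r]) - 19):
--             if all((masks[r + k] >> c) & pat[k] == pat[k] for k in range(3)):
--                 for k in range(3):
--                     masks[r + k] ^= pat[k] << c
--                 found = True
--     return found
-- ===== Notes on version B (the rewrite author's own statement) =====
-- stated objective: alternative
-- what changed: B packs each grid row into one integer bitmask ('#' cells = set bits) built in a single preprocessing pass; a monster test is then three shift-and-AND mask comparisons instead of A's fifteen per-cell string comparisons against three offset lists, and marking a found monster is an XOR that clears the matched bits instead of A's in-place '#'->'O' mutation of the grid (return value only is claimed: A mutates its argument, B does not).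
import Mathlib
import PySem

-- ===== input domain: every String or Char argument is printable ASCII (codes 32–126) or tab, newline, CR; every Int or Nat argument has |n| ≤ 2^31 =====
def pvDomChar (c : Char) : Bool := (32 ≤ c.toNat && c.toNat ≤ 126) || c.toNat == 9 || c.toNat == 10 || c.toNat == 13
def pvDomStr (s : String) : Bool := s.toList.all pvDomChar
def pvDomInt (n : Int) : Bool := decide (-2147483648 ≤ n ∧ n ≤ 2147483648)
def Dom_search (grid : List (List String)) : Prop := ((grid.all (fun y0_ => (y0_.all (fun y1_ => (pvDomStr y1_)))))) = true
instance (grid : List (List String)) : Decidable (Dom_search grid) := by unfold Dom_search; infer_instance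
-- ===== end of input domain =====

-- B replaces A's per-cell string comparisons and in-place '#'→'O' grid mutation by per-row integer
-- bitmasks: each row becomes one integer, a monster test is three shift-and-AND mask comparisons and
-- marking is an XOR that clears the matched bits (return value only is claimed: A's in-place
-- mutation of `grid` is an observable side effect B does not perform); objective: alternative.

-- ===== PORT A =====
-- (A's dead binding `strings = ["".join(row) for row in grid]` has no effect on the result and is
--  omitted; the '#'-offset indices are nonnegative positions, ported as Nat.)
def pvIdxA (s : String) : List Nat :=
  s.toList.zipIdx.filterMap (fun ic => if ic.1 = '#' then some ic.2 else none)

def pA1 : List Nat := pvIdxA "                  # "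
def pA2 : List Nat := pvIdxA "#    ##    ##    ###"
def pA3 : List Nat := pvIdxA " #  #  #  #  #  #   "

-- all(grid[r'][c+i] == '#' for i in ps)
def pvCheckA (row : List String) (c : Nat) (ps : List Nat) : Bool :=
  ps.all (fun i => row.getD (c + i) "" == "#")

-- for i in ps: grid[r'][c+i] = 'O'
def pvMarkA (row : List String) (c : Nat) (ps : List Nat) : List String :=
  ps.foldl (fun acc i => acc.set (c + i) "O") row

-- inner `for c, _ in enumerate(row)` loop with its break (len(row) is invariant, passed as rowlen)
def pvInnerA (rowlen r : Nat) (g : List (List String)) (c : Nat) (res : Bool) :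
    List (List String) × Bool :=
  if h : c < rowlen then
    if rowlen < c + 20 then (g, res)
    else if pvCheckA (g.getD r []) c pA1 && pvCheckA (g.getD (r + 1) []) c pA2 &&
            pvCheckA (g.getD (r + 2) []) c pA3 then
      let ga := g.set r (pvMarkA (g.getD r []) c pA1)
      let gb := ga.set (r + 1) (pvMarkA (ga.getD (r + 1) []) c pA2)
      let gc := gb.set (r + 2) (pvMarkA (gb.getD (r + 2) []) c pA3)
      pvInnerA rowlen r gc (c + 1) true
    else pvInnerA rowlen r g (c + 1) res
  else (g, res)
termination_by rowlen - c
decreasing_by all_goals omega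

-- outer `for r, row in enumerate(grid)` loop with its break (len(grid) is invariant, passed as glen)
def pvOuterA (glen : Nat) (g : List (List String)) (r : Nat) (res : Bool) : Bool :=
  if h : r < glen then
    if glen < r + 2 then res
    else
      let p := pvInnerA ((g.getD r []).length) r g 0 res
      pvOuterA glen p.1 (r + 1) p.2
  else res
termination_by glen - r

def search (grid : List (List String)) : Bool :=
  pvOuterA grid.length grid 0 false

-- ===== PORT B =====
def pvMonster : List String :=
  ["                  # ", "#    ##    ##    ###", " #  #  #  #  #  #   "]

-- def bits(cells): m = 0; for j, cell in enumerate(cells): if cell == '#': m |= 1 << j; return m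
-- (used on grid rows, i.e. lists of cell strings)
def pvBits (cells : List String) : Nat :=
  cells.zipIdx.foldl (fun m p => if p.1 == "#" then m ||| ((1 : Nat) <<< p.2) else m) 0

-- the same Python helper applied to the monster template strings (iteration over characters)
def pvBitsStr (s : String) : Nat :=
  s.toList.zipIdx.foldl (fun m p => if p.1 == '#' then m ||| ((1 : Nat) <<< p.2) else m) 0

-- pat = [bits(s) for s in monster]
def pvPat : List Nat := pvMonster.map pvBitsStr

-- all((masks[r + k] >> c) & pat[k] == pat[k] for k in range(3))
def pvHitM (masks pat : List Nat) (r c : Nat) : Bool :=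
  (List.range 3).all (fun k => ((masks.getD (r + k) 0) >>> c) &&& pat.getD k 0 == pat.getD k 0)

-- for k in range(3): masks[r + k] ^= pat[k] << c
def pvClearM (pat : List Nat) (r c : Nat) (masks : List Nat) : List Nat :=
  (List.range 3).foldl
    (fun ms k => ms.set (r + k) ((ms.getD (r + k) 0) ^^^ ((pat.getD k 0) <<< c))) masks

def pvStepM (pat : List Nat) (r : Nat) (st : List Nat × Bool) (c : Nat) : List Nat × Bool :=
  if pvHitM st.1 pat r c then (pvClearM pat r c st.1, true) else st

-- range(len(grid) - 2) and range(len(grid[r]) - 19): Nat truncation = Python's empty range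
def search_alt (grid : List (List String)) : Bool :=
  ((List.range (grid.length - 2)).foldl
      (fun st r => (List.range ((grid.getD r []).length - 19)).foldl (pvStepM pvPat r) st)
      (grid.map pvBits, false)).2

-- ===== PRECONDITION & SPEC =====
-- Pre_ conservatively excludes grids where a partial monster prefix (the row-0 '#', and possibly the
-- row-1 '#'s too) matches at a position whose next monster row would run past a missing or too-short
-- grid row: exactly there Python A can raise IndexError (on some such grids A still returns, because
-- an earlier in-place 'O' or a non-'#' cell short-circuits the check before the out-of-range index).
def Pre_search (grid : List (List String)) : Prop :=
  ∀ r < grid.length, r + 2 ≤ grid.length →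
    ∀ c < (grid.getD r []).length, c + 20 ≤ (grid.getD r []).length →
      ¬((grid.getD r []).getD (c + 18) "" = "#" ∧
        ((grid.getD (r + 1) []).length < c + 20 ∨
          ((∀ i ∈ ([0, 5, 6, 11, 12, 17, 18, 19] : List Nat),
              (grid.getD (r + 1) []).getD (c + i) "" = "#") ∧
            (grid.getD (r + 2) []).length < c + 20)))
instance (grid : List (List String)) : Decidable (Pre_search grid) := by
  unfold Pre_search; exact Nat.decidableBallLT _ _

def pvWitness_search : List (List String) := [[".", "#"]]

def Spec_search (grid : List (List String)) (out : Bool) : Prop := out = search_alt grid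
instance (grid : List (List String)) (out : Bool) : Decidable (Spec_search grid out) := by
  unfold Spec_search; infer_instance

-- ===== CLAIM (what is proved, stated in full; the proofs are below) =====
def Claim_equal_search : Prop := ∀ (grid : List (List String)), Dom_search grid → Pre_search grid → Spec_search grid (search grid)

-- ===== LEMMAS AND PROOFS =====

-- proof-only model of A's marking: an untouched grid plus a set of already-claimed coordinates
def pvOffsets : List (Nat × Nat) :=
  [(0, 18), (1, 0), (1, 5), (1, 6), (1, 11), (1, 12), (1, 17), (1, 18), (1, 19),
   (2, 1), (2, 4), (2, 7), (2, 10), (2, 13), (2, 16)]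

def pvHitB (grid : List (List String)) (marked : PySem.Set (Nat × Nat)) (r c : Nat) : Bool :=
  pvOffsets.all (fun d =>
    (grid.getD (r + d.1) []).getD (c + d.2) "" == "#" &&
      !(PySem.Set.contains marked (r + d.1, c + d.2)))

def pvStepB (grid : List (List String)) (r : Nat)
    (st : PySem.Set (Nat × Nat) × Bool) (c : Nat) : PySem.Set (Nat × Nat) × Bool :=
  if pvHitB grid st.1 r c then
    (pvOffsets.foldl (fun m d => PySem.Set.add m (r + d.1, c + d.2)) st.1, true)
  else st

lemma getD_set {α : Type} (l : List α) (k j : Nat) (v d : α) :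
    (l.set k v).getD j d = if k = j ∧ j < l.length then v else l.getD j d := by
  rw [List.getD_eq_getElem?_getD, List.getD_eq_getElem?_getD, List.getElem?_set]
  split_ifs with h1 h2 h3 <;> simp_all

lemma contains_foldl_add (l : List (Nat × Nat)) (s : PySem.Set (Nat × Nat))
    (f : Nat × Nat → Nat × Nat) (y : Nat × Nat) :
    PySem.Set.contains (l.foldl (fun m d => PySem.Set.add m (f d)) s) y =
      (PySem.Set.contains s y || l.any (fun d => y == f d)) := by
  induction l generalizing s with
  | nil => simp
  | cons a l ih =>
    simp only [List.foldl_cons, List.any_cons, ih]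
    rw [Bool.eq_iff_iff]
    simp [PySem.Set.mem_add]
    tauto

lemma pvMarkA_length (row : List String) (c : Nat) (ps : List Nat) :
    (pvMarkA row c ps).length = row.length := by
  induction ps generalizing row with
  | nil => rfl
  | cons p ps ih =>
    show (pvMarkA (row.set (c+p) "O") c ps).length = _
    rw [ih]; simp

lemma pvMarkA_getD (row : List String) (c : Nat) (ps : List Nat) (j : Nat) :
    (pvMarkA row c ps).getD j "" =
      if ps.any (fun p => c + p == j) && decide (j < row.length) then "O"
      else row.getD j "" := by
  induction ps generalizing row with
  | nil => simp [pvMarkA]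
  | cons p ps ih =>
    show (pvMarkA (row.set (c+p) "O") c ps).getD j "" = _
    rw [ih, getD_set]
    simp only [List.length_set, List.any_cons]
    by_cases h1 : c + p = j <;> by_cases h2 : j < row.length <;>
      by_cases h3 : (ps.any (fun p => c + p == j)) = true <;>
      simp_all

lemma pA1_eq : pA1 = [18] := by decide

lemma pA2_eq : pA2 = [0, 5, 6, 11, 12, 17, 18, 19] := by decide

lemma pA3_eq : pA3 = [1, 4, 7, 10, 13, 16] := by decide

-- invariant: A's mutated grid g is the original grid overlaid with "O" at the marked coordinates
def pvInv (orig g : List (List String)) (marked : PySem.Set (Nat × Nat)) : Prop :=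
  (∀ i, (g.getD i []).length = (orig.getD i []).length) ∧
  (∀ i j, (g.getD i []).getD j "" =
      if PySem.Set.contains marked (i, j) then "O" else (orig.getD i []).getD j "")

lemma pvAtom (b : Bool) (x : String) :
    ((if b then "O" else x) == "#") = ((x == "#") && !b) := by
  cases b <;> simp

lemma pvHit_eq (orig g : List (List String)) (marked : PySem.Set (Nat × Nat)) (r c : Nat)
    (hInv : pvInv orig g marked) :
    pvHitB orig marked r c =
      (pvCheckA (g.getD r []) c pA1 && pvCheckA (g.getD (r + 1) []) c pA2 &&
        pvCheckA (g.getD (r + 2) []) c pA3) := by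
  obtain ⟨h1, h2⟩ := hInv
  unfold pvHitB pvCheckA
  rw [pA1_eq, pA2_eq, pA3_eq]
  show (pvOffsets.all _) = _
  rw [show pvOffsets = [(0, 18), (1, 0), (1, 5), (1, 6), (1, 11), (1, 12), (1, 17), (1, 18),
    (1, 19), (2, 1), (2, 4), (2, 7), (2, 10), (2, 13), (2, 16)] from rfl]
  simp only [List.all_cons, List.all_nil, h2, pvAtom, Nat.add_zero, Bool.and_true,
    Bool.and_assoc]

lemma row_overlay (rowg roworig : List String) (marked : PySem.Set (Nat × Nat))
    (ps : List Nat) (i j c : Nat) (Q : Bool)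
    (hcell : ∀ j', rowg.getD j' "" =
      if PySem.Set.contains marked (i, j') then "O" else roworig.getD j' "")
    (hlen : ∀ p ∈ ps, c + p < rowg.length)
    (hQ : Q = (PySem.Set.contains marked (i, j) || ps.any (fun p => c + p == j))) :
    (pvMarkA rowg c ps).getD j "" = if Q then "O" else roworig.getD j "" := by
  rw [pvMarkA_getD]
  by_cases hany : ps.any (fun p => c + p == j) = true
  · obtain ⟨p, hp, hpe⟩ := List.any_eq_true.mp hany
    have : j < rowg.length := by
      have := hlen p hp; simp only [beq_iff_eq] at hpe; omega
    simp [hany, this, hQ]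
  · simp only [Bool.not_eq_true] at hany
    simp only [hany, hQ, Bool.or_false, Bool.false_and]
    simpa using hcell j

lemma getD_hash_lt (row : List String) (j : Nat) (h : (row.getD j "" == "#") = true) :
    j < row.length := by
  by_contra hc
  rw [List.getD_eq_default] at h
  · simp at h
  · omega

lemma pvStep_inv (orig g : List (List String)) (marked : PySem.Set (Nat × Nat)) (r c : Nat)
    (hInv : pvInv orig g marked)
    (hok : (pvCheckA (g.getD r []) c pA1 && pvCheckA (g.getD (r + 1) []) c pA2 &&
        pvCheckA (g.getD (r + 2) []) c pA3) = true) :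
    pvInv orig
      (((g.set r (pvMarkA (g.getD r []) c pA1)).set (r + 1)
          (pvMarkA ((g.set r (pvMarkA (g.getD r []) c pA1)).getD (r + 1) []) c pA2)).set (r + 2)
        (pvMarkA (((g.set r (pvMarkA (g.getD r []) c pA1)).set (r + 1)
            (pvMarkA ((g.set r (pvMarkA (g.getD r []) c pA1)).getD (r + 1) []) c pA2)).getD (r + 2) []) c pA3))
      (pvOffsets.foldl (fun m d => PySem.Set.add m (r + d.1, c + d.2)) marked) := by
  obtain ⟨h1, h2⟩ := hInv
  simp only [pvCheckA, pA1_eq, pA2_eq, pA3_eq, List.all_cons, List.all_nil, Bool.and_true,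
    Bool.and_eq_true] at hok
  obtain ⟨⟨a0, b0, b5, b6, b11, b12, b17, b18, b19⟩, c1, c4, c7, c10, c13, c16⟩ := hok
  have l0 := getD_hash_lt _ _ a0
  have lb : ∀ p ∈ ([0, 5, 6, 11, 12, 17, 18, 19] : List Nat),
      c + p < (g.getD (r + 1) []).length := by
    intro p hp
    have e0 := getD_hash_lt _ _ b0; have e5 := getD_hash_lt _ _ b5
    have e6 := getD_hash_lt _ _ b6; have e11 := getD_hash_lt _ _ b11
    have e12 := getD_hash_lt _ _ b12; have e17 := getD_hash_lt _ _ b17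
    have e18 := getD_hash_lt _ _ b18; have e19 := getD_hash_lt _ _ b19
    fin_cases hp <;> omega
  have lc : ∀ p ∈ ([1, 4, 7, 10, 13, 16] : List Nat),
      c + p < (g.getD (r + 2) []).length := by
    intro p hp
    have e1 := getD_hash_lt _ _ c1; have e4 := getD_hash_lt _ _ c4
    have e7 := getD_hash_lt _ _ c7; have e10 := getD_hash_lt _ _ c10
    have e13 := getD_hash_lt _ _ c13; have e16 := getD_hash_lt _ _ c16
    fin_cases hp <;> omega
  have la : ∀ p ∈ ([18] : List Nat), c + p < (g.getD r []).length := by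
    intro p hp; fin_cases hp <;> omega
  have hr : r < g.length := by
    by_contra h
    rw [List.getD_eq_default _ _ (by omega)] at l0; simp at l0
  have hr1 : r + 1 < g.length := by
    by_contra h
    have := lb 0 (by simp)
    rw [List.getD_eq_default _ _ (by omega)] at this; simp at this
  have hr2 : r + 2 < g.length := by
    by_contra h
    have := lc 1 (by simp)
    rw [List.getD_eq_default _ _ (by omega)] at this; simp at this
  -- the two inner row reads are the untouched rows r+1, r+2 of g
  have hga1 : (g.set r (pvMarkA (g.getD r []) c pA1)).getD (r + 1) [] = g.getD (r + 1) [] := by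
    rw [getD_set]; rw [if_neg (by omega)]
  rw [hga1]
  have hgb2 : ((g.set r (pvMarkA (g.getD r []) c pA1)).set (r + 1)
      (pvMarkA (g.getD (r + 1) []) c pA2)).getD (r + 2) []
      = g.getD (r + 2) [] := by
    rw [getD_set]; simp only [List.length_set]
    rw [if_neg (by omega), getD_set, if_neg (by omega)]
  rw [hgb2]
  constructor
  · intro i
    rw [getD_set, getD_set, getD_set]
    simp only [List.length_set]
    by_cases hi2 : i = r + 2
    · subst hi2; rw [if_pos ⟨rfl, hr2⟩, pvMarkA_length]; exact h1 _
    · rw [if_neg (by omega)]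
      by_cases hi1 : i = r + 1
      · subst hi1; rw [if_pos ⟨rfl, hr1⟩, pvMarkA_length]; exact h1 _
      · rw [if_neg (by omega)]
        by_cases hi0 : i = r
        · subst hi0; rw [if_pos ⟨rfl, hr⟩, pvMarkA_length]; exact h1 _
        · rw [if_neg (by omega)]; exact h1 _
  · intro i j
    rw [getD_set, getD_set, getD_set]
    simp only [List.length_set]
    rw [contains_foldl_add]
    simp only [pvOffsets]
    by_cases hi2 : i = r + 2
    · subst hi2
      rw [if_pos ⟨rfl, hr2⟩]
      have hQ3 : (PySem.Set.contains marked ((r + 2, j) : Nat × Nat) ||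
          ([((0:Nat),(18:Nat)), (1,0), (1,5), (1,6), (1,11), (1,12), (1,17), (1,18), (1,19), (2,1), (2,4), (2,7), (2,10), (2,13), (2,16)] : List (Nat × Nat)).any
            (fun d => ((r + 2, j) : Nat × Nat) == (r + d.1, c + d.2)))
          = (PySem.Set.contains marked (r + 2, j) ||
             ([1, 4, 7, 10, 13, 16] : List Nat).any (fun p => c + p == j)) := by
        rw [Bool.eq_iff_iff]
        cases hc : PySem.Set.contains marked (r + 2, j) <;>
          simp [beq_iff_eq, Prod.ext_iff] <;> omega
      rw [pA3_eq,
        row_overlay _ (orig.getD (r + 2) []) marked _ _ _ _ _ (fun j' => h2 _ j') lc hQ3]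
      rfl
    · rw [if_neg (by omega)]
      by_cases hi1 : i = r + 1
      · subst hi1
        rw [if_pos ⟨rfl, hr1⟩]
        have hQ2 : (PySem.Set.contains marked ((r + 1, j) : Nat × Nat) ||
            ([((0:Nat),(18:Nat)), (1,0), (1,5), (1,6), (1,11), (1,12), (1,17), (1,18), (1,19), (2,1), (2,4), (2,7), (2,10), (2,13), (2,16)] : List (Nat × Nat)).any
              (fun d => ((r + 1, j) : Nat × Nat) == (r + d.1, c + d.2)))
            = (PySem.Set.contains marked (r + 1, j) ||
               ([0, 5, 6, 11, 12, 17, 18, 19] : List Nat).any (fun p => c + p == j)) := by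
          rw [Bool.eq_iff_iff]
          cases hc : PySem.Set.contains marked (r + 1, j) <;>
            simp [beq_iff_eq, Prod.ext_iff] <;> omega
        rw [pA2_eq,
          row_overlay _ (orig.getD (r + 1) []) marked _ _ _ _ _ (fun j' => h2 _ j') lb hQ2]
        rfl
      · rw [if_neg (by omega)]
        by_cases hi0 : i = r
        · subst hi0
          rw [if_pos ⟨rfl, hr⟩]
          have hQ1 : (PySem.Set.contains marked ((i, j) : Nat × Nat) ||
              ([((0:Nat),(18:Nat)), (1,0), (1,5), (1,6), (1,11), (1,12), (1,17), (1,18), (1,19), (2,1), (2,4), (2,7), (2,10), (2,13), (2,16)] : List (Nat × Nat)).any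
                (fun d => ((i, j) : Nat × Nat) == (i + d.1, c + d.2)))
              = (PySem.Set.contains marked (i, j) ||
                 ([18] : List Nat).any (fun p => c + p == j)) := by
            rw [Bool.eq_iff_iff]
            cases hc : PySem.Set.contains marked (i, j) <;>
              simp [beq_iff_eq, Prod.ext_iff] <;> omega
          rw [pA1_eq,
            row_overlay _ (orig.getD i []) marked _ _ _ _ _ (fun j' => h2 _ j') la hQ1]
          rfl
        · rw [if_neg (by omega)]
          rw [h2 i j]
          simp [beq_iff_eq, Prod.ext_iff, hi0, hi1, hi2]

lemma pvInnerA_eq (orig : List (List String)) (r rowlen : Nat)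
    (hrow : rowlen = (orig.getD r []).length) (h20 : 20 ≤ rowlen) :
    ∀ (k c : Nat) (g : List (List String)) (marked : PySem.Set (Nat × Nat)) (res : Bool),
      pvInv orig g marked → c + k = rowlen + 1 - 20 →
      pvInv orig (pvInnerA rowlen r g c res).1
          ((List.range' c k).foldl (pvStepB orig r) (marked, res)).1 ∧
      (pvInnerA rowlen r g c res).2 =
          ((List.range' c k).foldl (pvStepB orig r) (marked, res)).2 := by
  intro k
  induction k with
  | zero =>
    intro c g marked res hInv hc
    rw [pvInnerA, dif_pos (by omega), if_pos (by omega)]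
    exact ⟨hInv, rfl⟩
  | succ k ih =>
    intro c g marked res hInv hc
    rw [List.range'_succ, List.foldl_cons]
    rw [pvInnerA, dif_pos (by omega), if_neg (by omega)]
    simp only [pvStepB, pvHit_eq orig g marked r c hInv]
    by_cases hok : (pvCheckA (g.getD r []) c pA1 && pvCheckA (g.getD (r + 1) []) c pA2 &&
        pvCheckA (g.getD (r + 2) []) c pA3) = true
    · rw [if_pos hok, if_pos hok]
      exact ih (c + 1) _ _ true (pvStep_inv orig g marked r c hInv hok) (by omega)
    · rw [if_neg hok, if_neg hok]
      exact ih (c + 1) g marked res hInv (by omega)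

lemma pvInnerA_small (rowlen r : Nat) (g : List (List String)) (res : Bool)
    (h : rowlen < 20) : pvInnerA rowlen r g 0 res = (g, res) := by
  rw [pvInnerA]
  split <;> rfl

lemma pvInnerA_noop (rowlen r : Nat) :
    ∀ (k c : Nat) (g : List (List String)) (res : Bool), rowlen - c ≤ k →
      (g.getD (r + 2) []).length = 0 → pvInnerA rowlen r g c res = (g, res) := by
  intro k
  induction k with
  | zero =>
    intro c g res hk h0
    rw [pvInnerA, dif_neg (by omega)]
  | succ k ih =>
    intro c g res hk h0
    rw [pvInnerA]
    split
    · by_cases hb : rowlen < c + 20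
      · rw [if_pos hb]
      · rw [if_neg hb]
        have hrow : g.getD (r + 2) [] = [] := List.eq_nil_of_length_eq_zero h0
        have hchk : pvCheckA (g.getD (r + 2) []) c pA3 = false := by
          rw [hrow]; simp [pvCheckA, pA3_eq]
        rw [hchk]
        simp only [Bool.and_false, Bool.false_eq_true, if_false]
        exact ih (c + 1) g res (by omega) h0
    · rfl

lemma pvOuterA_eq (orig : List (List String)) :
    ∀ (k r : Nat) (g : List (List String)) (marked : PySem.Set (Nat × Nat)) (res : Bool),
      pvInv orig g marked → r + k = orig.length - 2 →
      pvOuterA orig.length g r res =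
        ((List.range' r k).foldl
            (fun st r' =>
              (List.range ((orig.getD r' []).length + 1 - 20)).foldl (pvStepB orig r') st)
            (marked, res)).2 := by
  intro k
  induction k with
  | zero =>
    intro r g marked res hInv hr
    rw [pvOuterA]
    by_cases h : r < orig.length
    · rw [dif_pos h]
      by_cases h2 : orig.length < r + 2
      · rw [if_pos h2]; rfl
      · rw [if_neg h2]
        have hglen : orig.length = r + 2 := by omega
        have h0 : (g.getD (r + 2) []).length = 0 := by
          rw [hInv.1 (r + 2), List.getD_eq_default _ _ (by omega)]
          rfl
        simp only []
        rw [pvInnerA_noop ((g.getD r []).length) r ((g.getD r []).length) 0 g res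
          (by omega) h0]
        rw [pvOuterA, dif_pos (by omega), if_pos (by omega)]
        rfl
    · rw [dif_neg h]; rfl
  | succ k ih =>
    intro r g marked res hInv hr
    rw [pvOuterA, dif_pos (by omega), if_neg (by omega)]
    rw [List.range'_succ, List.foldl_cons]
    simp only []
    rw [hInv.1 r]
    by_cases h20 : 20 ≤ (orig.getD r []).length
    · have key := pvInnerA_eq orig r ((orig.getD r []).length) rfl h20
        ((orig.getD r []).length + 1 - 20) 0 g marked res hInv (by omega)
      rw [List.range_eq_range']
      have step := ih (r + 1) (pvInnerA ((orig.getD r []).length) r g 0 res).1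
        ((List.range' 0 ((orig.getD r []).length + 1 - 20)).foldl (pvStepB orig r)
          (marked, res)).1
        (pvInnerA ((orig.getD r []).length) r g 0 res).2 key.1 (by omega)
      rw [step, key.2]
    · rw [pvInnerA_small _ _ _ _ (by omega)]
      have hz : (orig.getD r []).length + 1 - 20 = 0 := by omega
      rw [hz]
      exact ih (r + 1) g marked res hInv (by omega)

-- ===== B side: bitmask state mirrors the coordinate-set state =====

def pvMaskInv (orig : List (List String)) (masks : List Nat)
    (marked : PySem.Set (Nat × Nat)) : Prop :=
  masks.length = orig.length ∧
  ∀ i j, (masks.getD i 0).testBit j =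
    (((orig.getD i []).getD j "" == "#") && !(PySem.Set.contains marked (i, j)))

lemma testBit_bits_aux :
    ∀ (cells : List String) (i m : Nat), (∀ b, i ≤ b → m.testBit b = false) →
    ∀ j, ((cells.zipIdx i).foldl
        (fun m p => if p.1 == "#" then m ||| ((1 : Nat) <<< p.2) else m) m).testBit j
      = if j < i then m.testBit j else (cells.getD (j - i) "" == "#") := by
  intro cells
  induction cells with
  | nil =>
    intro i m hm j
    simp only [List.zipIdx_nil, List.foldl_nil]
    by_cases h : j < i
    · rw [if_pos h]
    · rw [if_neg h, hm j (by omega)]; simp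
  | cons a t ih =>
    intro i m hm j
    simp only [List.zipIdx_cons, List.foldl_cons]
    have hbit : ∀ b, ((1 : Nat) <<< i).testBit b = decide (b = i) := by
      intro b
      rw [Nat.one_shiftLeft]
      by_cases hb : b = i
      · subst hb; simp [Nat.testBit_two_pow_self]
      · rw [Nat.testBit_two_pow_of_ne (fun h => hb h.symm)]
        simp [hb]
    have hm' : ∀ b, i + 1 ≤ b →
        (if a == "#" then m ||| ((1 : Nat) <<< i) else m).testBit b = false := by
      intro b hb
      by_cases ha : (a == "#") = true
      · rw [if_pos ha, Nat.testBit_or, hm b (by omega), hbit b]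
        simp [show ¬ b = i by omega]
      · rw [if_neg ha]; exact hm b (by omega)
    have hmi : ∀ b, b < i →
        (if a == "#" then m ||| ((1 : Nat) <<< i) else m).testBit b = m.testBit b := by
      intro b hb
      by_cases ha : (a == "#") = true
      · rw [if_pos ha, Nat.testBit_or, hbit b]
        simp [show ¬ b = i by omega]
      · rw [if_neg ha]
    have hmii : (if a == "#" then m ||| ((1 : Nat) <<< i) else m).testBit i = (a == "#") := by
      by_cases ha : (a == "#") = true
      · rw [if_pos ha, Nat.testBit_or, hbit i, hm i (by omega), ha]
        simp
      · rw [if_neg ha, hm i (by omega)]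
        simp only [Bool.not_eq_true] at ha
        exact ha.symm
    rw [ih (i + 1) _ hm' j]
    by_cases hji : j < i
    · rw [if_pos (show j < i + 1 by omega), if_pos hji, hmi j hji]
    · by_cases hj : j = i
      · subst hj
        rw [if_pos (Nat.lt_succ_self j), if_neg (Nat.lt_irrefl j), hmii, Nat.sub_self]
        simp
      · rw [if_neg (show ¬ j < i + 1 by omega), if_neg hji,
          show j - i = (j - (i + 1)) + 1 from by omega, List.getD_cons_succ]

lemma testBit_pvBits (cells : List String) (j : Nat) :
    (pvBits cells).testBit j = ((cells.getD j "" == "#")) := by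
  have := testBit_bits_aux cells 0 0 (by intro b _; simp) j
  simpa [pvBits] using this

lemma pvPat_eq : pvPat = [262144, 923745, 74898] := by decide

lemma pat_testBit_of_lit (P : Nat) (bs : List Nat) (hlt : P < 2 ^ 20)
    (hbs : ∀ b ∈ bs, b < 20) (hsm : ∀ i < 20, P.testBit i = bs.contains i) :
    ∀ i, P.testBit i = bs.contains i := by
  intro i
  by_cases h : i < 20
  · exact hsm i h
  · rw [Nat.testBit_eq_false_of_lt
      (lt_of_lt_of_le hlt (Nat.pow_le_pow_right (by omega) (by omega)))]
    symm
    rw [List.contains_eq_any_beq, List.any_eq_false]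
    intro b hb
    have := hbs b hb
    simp only [beq_iff_eq]
    omega

lemma pat0_testBit : ∀ i, (262144 : Nat).testBit i = ([18] : List Nat).contains i :=
  pat_testBit_of_lit _ _ (by norm_num) (by decide) (by decide)

lemma pat1_testBit :
    ∀ i, (923745 : Nat).testBit i = ([0, 5, 6, 11, 12, 17, 18, 19] : List Nat).contains i :=
  pat_testBit_of_lit _ _ (by norm_num) (by decide) (by decide)

lemma pat2_testBit :
    ∀ i, (74898 : Nat).testBit i = ([1, 4, 7, 10, 13, 16] : List Nat).contains i :=
  pat_testBit_of_lit _ _ (by norm_num) (by decide) (by decide)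

lemma maskCheck (P : Nat) (bs : List Nat) (hP : ∀ i, P.testBit i = bs.contains i)
    (m c : Nat) :
    (((m >>> c) &&& P) == P) = bs.all (fun b => m.testBit (c + b)) := by
  rw [Bool.eq_iff_iff, beq_iff_eq, List.all_eq_true]
  constructor
  · intro h b hb
    have hb' : P.testBit b = true := by
      rw [hP]; simpa using hb
    have := congrArg (Nat.testBit · b) h
    simp only [Nat.testBit_and, Nat.testBit_shiftRight, hb', Bool.and_true] at this
    simpa using this
  · intro h
    apply Nat.eq_of_testBit_eq
    intro i
    rw [Nat.testBit_and, Nat.testBit_shiftRight, hP]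
    by_cases hi : i ∈ bs
    · rw [show bs.contains i = true from by simpa using hi, h i hi]
      simp
    · rw [show bs.contains i = false from by simpa using hi]
      simp

lemma clearBit (m P : Nat) (bs : List Nat) (hP : ∀ i, P.testBit i = bs.contains i)
    (c j : Nat) :
    (m ^^^ (P <<< c)).testBit j = (m.testBit j ^^ bs.any (fun b => j == c + b)) := by
  rw [Nat.testBit_xor, Nat.testBit_shiftLeft, hP]
  congr 1
  rw [Bool.eq_iff_iff]
  simp only [Bool.and_eq_true, decide_eq_true_eq, List.contains_eq_any_beq,
    List.any_eq_true, beq_iff_eq]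
  constructor
  · rintro ⟨hc, b, hb, he⟩; exact ⟨b, hb, by omega⟩
  · rintro ⟨b, hb, he⟩; exact ⟨by omega, b, hb, by omega⟩

lemma pvHitM_eq (orig : List (List String)) (masks : List Nat)
    (marked : PySem.Set (Nat × Nat)) (r c : Nat)
    (hInv : pvMaskInv orig masks marked) :
    pvHitM masks pvPat r c = pvHitB orig marked r c := by
  obtain ⟨-, h2⟩ := hInv
  unfold pvHitM pvHitB
  rw [pvPat_eq]
  rw [show pvOffsets = [(0, 18), (1, 0), (1, 5), (1, 6), (1, 11), (1, 12), (1, 17), (1, 18),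
    (1, 19), (2, 1), (2, 4), (2, 7), (2, 10), (2, 13), (2, 16)] from rfl]
  rw [show List.range 3 = [0, 1, 2] from rfl]
  simp only [List.all_cons, List.all_nil, List.getD_cons_zero, List.getD_cons_succ]
  rw [maskCheck _ _ pat0_testBit, maskCheck _ _ pat1_testBit, maskCheck _ _ pat2_testBit]
  simp only [List.all_cons, List.all_nil, h2, Nat.add_zero, Bool.and_true, Bool.and_assoc]

lemma pvClearM_inv (orig : List (List String)) (masks : List Nat)
    (marked : PySem.Set (Nat × Nat)) (r c : Nat) (hr : r + 2 < orig.length)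
    (hInv : pvMaskInv orig masks marked)
    (hhit : pvHitM masks pvPat r c = true) :
    pvMaskInv orig (pvClearM pvPat r c masks)
      (pvOffsets.foldl (fun m d => PySem.Set.add m (r + d.1, c + d.2)) marked) := by
  obtain ⟨hlen, h2⟩ := hInv
  -- extract the 15 set bits from the hit
  unfold pvHitM at hhit
  rw [pvPat_eq, show List.range 3 = [0, 1, 2] from rfl] at hhit
  simp only [List.all_cons, List.all_nil, List.getD_cons_zero, List.getD_cons_succ,
    Bool.and_true, Bool.and_eq_true] at hhit
  rw [maskCheck _ _ pat0_testBit, maskCheck _ _ pat1_testBit, maskCheck _ _ pat2_testBit]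
    at hhit
  obtain ⟨hit0, hit1, hit2⟩ := hhit
  rw [List.all_eq_true] at hit0 hit1 hit2
  -- unfold the three in-place updates
  unfold pvClearM
  rw [pvPat_eq, show List.range 3 = [0, 1, 2] from rfl]
  simp only [List.foldl_cons, List.foldl_nil, List.getD_cons_zero, List.getD_cons_succ,
    Nat.add_zero]
  have hg1 : (masks.set r (masks.getD r 0 ^^^ (262144 <<< c))).getD (r + 1) 0
      = masks.getD (r + 1) 0 := by rw [getD_set, if_neg (by omega)]
  rw [hg1]
  have hg2 : ((masks.set r (masks.getD r 0 ^^^ (262144 <<< c))).set (r + 1)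
        (masks.getD (r + 1) 0 ^^^ (923745 <<< c))).getD
        (r + 2) 0 = masks.getD (r + 2) 0 := by
    rw [getD_set]; simp only [List.length_set]
    rw [if_neg (by omega), getD_set, if_neg (by omega)]
  rw [hg2]
  have hrm : r < masks.length := by omega
  have hrm1 : r + 1 < masks.length := by omega
  have hrm2 : r + 2 < masks.length := by omega
  constructor
  · simp [hlen]
  · intro i j
    rw [getD_set, getD_set, getD_set]
    simp only [List.length_set]
    rw [contains_foldl_add]
    simp only [pvOffsets]
    by_cases hi2 : i = r + 2
    · subst hi2
      rw [if_pos ⟨rfl, hrm2⟩, clearBit _ _ _ pat2_testBit, h2]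
      by_cases hA : (([1, 4, 7, 10, 13, 16] : List Nat).any (fun b => j == c + b)) = true
      · obtain ⟨b, hb, hbe⟩ := List.any_eq_true.mp hA
        simp only [beq_iff_eq] at hbe
        subst hbe
        have hx : (((orig.getD (r + 2) []).getD (c + b) "" == "#") &&
            !(PySem.Set.contains marked (r + 2, c + b))) = true := by
          rw [← h2]; exact hit2 b hb
        have hany : (([((0 : Nat), (18 : Nat)), (1, 0), (1, 5), (1, 6), (1, 11), (1, 12),
            (1, 17), (1, 18), (1, 19), (2, 1), (2, 4), (2, 7), (2, 10), (2, 13),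
            (2, 16)] : List (Nat × Nat)).any
            (fun d => ((r + 2, c + b) : Nat × Nat) == (r + d.1, c + d.2))) = true := by
          simp only [List.any_cons, List.any_nil]
          fin_cases hb <;> simp
        rw [hA, hx, hany]
        simp
      · rw [Bool.not_eq_true] at hA
        rw [hA]
        have hA' := List.any_eq_false.mp hA
        have n1 : j ≠ c + 1 := by simpa using hA' 1 (by simp)
        have n4 : j ≠ c + 4 := by simpa using hA' 4 (by simp)
        have n7 : j ≠ c + 7 := by simpa using hA' 7 (by simp)
        have n10 : j ≠ c + 10 := by simpa using hA' 10 (by simp)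
        have n13 : j ≠ c + 13 := by simpa using hA' 13 (by simp)
        have n16 : j ≠ c + 16 := by simpa using hA' 16 (by simp)
        have hany : (([((0 : Nat), (18 : Nat)), (1, 0), (1, 5), (1, 6), (1, 11), (1, 12),
            (1, 17), (1, 18), (1, 19), (2, 1), (2, 4), (2, 7), (2, 10), (2, 13),
            (2, 16)] : List (Nat × Nat)).any
            (fun d => ((r + 2, j) : Nat × Nat) == (r + d.1, c + d.2))) = false := by
          simp only [List.any_eq_false, beq_iff_eq, Prod.mk.injEq]
          intro d hd
          fin_cases hd <;> simp <;> omega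
        rw [hany]
        simp
    · rw [if_neg (by omega)]
      by_cases hi1 : i = r + 1
      · subst hi1
        rw [if_pos ⟨rfl, hrm1⟩, clearBit _ _ _ pat1_testBit, h2]
        by_cases hA : (([0, 5, 6, 11, 12, 17, 18, 19] : List Nat).any
            (fun b => j == c + b)) = true
        · obtain ⟨b, hb, hbe⟩ := List.any_eq_true.mp hA
          simp only [beq_iff_eq] at hbe
          subst hbe
          have hx : (((orig.getD (r + 1) []).getD (c + b) "" == "#") &&
              !(PySem.Set.contains marked (r + 1, c + b))) = true := by
            rw [← h2]; exact hit1 b hb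
          have hany : (([((0 : Nat), (18 : Nat)), (1, 0), (1, 5), (1, 6), (1, 11), (1, 12),
              (1, 17), (1, 18), (1, 19), (2, 1), (2, 4), (2, 7), (2, 10), (2, 13),
              (2, 16)] : List (Nat × Nat)).any
              (fun d => ((r + 1, c + b) : Nat × Nat) == (r + d.1, c + d.2))) = true := by
            simp only [List.any_cons, List.any_nil]
            fin_cases hb <;> simp
          rw [hA, hx, hany]
          simp
        · rw [Bool.not_eq_true] at hA
          rw [hA]
          have hA' := List.any_eq_false.mp hA
          have n0 : j ≠ c + 0 := by simpa using hA' 0 (by simp)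
          have n5 : j ≠ c + 5 := by simpa using hA' 5 (by simp)
          have n6 : j ≠ c + 6 := by simpa using hA' 6 (by simp)
          have n11 : j ≠ c + 11 := by simpa using hA' 11 (by simp)
          have n12 : j ≠ c + 12 := by simpa using hA' 12 (by simp)
          have n17 : j ≠ c + 17 := by simpa using hA' 17 (by simp)
          have n18 : j ≠ c + 18 := by simpa using hA' 18 (by simp)
          have n19 : j ≠ c + 19 := by simpa using hA' 19 (by simp)
          have hany : (([((0 : Nat), (18 : Nat)), (1, 0), (1, 5), (1, 6), (1, 11), (1, 12),
              (1, 17), (1, 18), (1, 19), (2, 1), (2, 4), (2, 7), (2, 10), (2, 13),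
              (2, 16)] : List (Nat × Nat)).any
              (fun d => ((r + 1, j) : Nat × Nat) == (r + d.1, c + d.2))) = false := by
            simp only [List.any_eq_false, beq_iff_eq, Prod.mk.injEq]
            intro d hd
            fin_cases hd <;> simp <;> omega
          rw [hany]
          simp
      · rw [if_neg (by omega)]
        by_cases hi0 : i = r
        · subst hi0
          rw [if_pos ⟨rfl, hrm⟩, clearBit _ _ _ pat0_testBit, h2]
          by_cases hA : (([18] : List Nat).any (fun b => j == c + b)) = true
          · obtain ⟨b, hb, hbe⟩ := List.any_eq_true.mp hA
            simp only [beq_iff_eq] at hbe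
            subst hbe
            have hx : (((orig.getD i []).getD (c + b) "" == "#") &&
                !(PySem.Set.contains marked (i, c + b))) = true := by
              rw [← h2]; simpa using hit0 b hb
            have hany : (([((0 : Nat), (18 : Nat)), (1, 0), (1, 5), (1, 6), (1, 11), (1, 12),
                (1, 17), (1, 18), (1, 19), (2, 1), (2, 4), (2, 7), (2, 10), (2, 13),
                (2, 16)] : List (Nat × Nat)).any
                (fun d => ((i, c + b) : Nat × Nat) == (i + d.1, c + d.2))) = true := by
              simp only [List.any_cons, List.any_nil]
              fin_cases hb <;> simp
            rw [hA, hx, hany]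
            simp
          · rw [Bool.not_eq_true] at hA
            rw [hA]
            have hA' := List.any_eq_false.mp hA
            have n18 : j ≠ c + 18 := by simpa using hA' 18 (by simp)
            have hany : (([((0 : Nat), (18 : Nat)), (1, 0), (1, 5), (1, 6), (1, 11), (1, 12),
                (1, 17), (1, 18), (1, 19), (2, 1), (2, 4), (2, 7), (2, 10), (2, 13),
                (2, 16)] : List (Nat × Nat)).any
                (fun d => ((i, j) : Nat × Nat) == (i + d.1, c + d.2))) = false := by
              simp only [List.any_eq_false, beq_iff_eq, Prod.mk.injEq]
              intro d hd
              fin_cases hd <;> simp <;> omega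
            rw [hany]
            simp
        · rw [if_neg (by omega), h2]
          have hany : (([((0 : Nat), (18 : Nat)), (1, 0), (1, 5), (1, 6), (1, 11), (1, 12),
              (1, 17), (1, 18), (1, 19), (2, 1), (2, 4), (2, 7), (2, 10), (2, 13),
              (2, 16)] : List (Nat × Nat)).any
              (fun d => ((i, j) : Nat × Nat) == (r + d.1, c + d.2))) = false := by
            simp only [List.any_eq_false, beq_iff_eq, Prod.mk.injEq]
            intro d hd
            fin_cases hd <;> simp <;> omega
          rw [hany]
          simp

lemma pvInnerM_eq (orig : List (List String)) (r : Nat) (hr : r + 2 < orig.length) :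
    ∀ (cs : List Nat) (masks : List Nat) (marked : PySem.Set (Nat × Nat)) (f : Bool),
      pvMaskInv orig masks marked →
      pvMaskInv orig (cs.foldl (pvStepM pvPat r) (masks, f)).1
          (cs.foldl (pvStepB orig r) (marked, f)).1 ∧
      (cs.foldl (pvStepM pvPat r) (masks, f)).2 =
          (cs.foldl (pvStepB orig r) (marked, f)).2 := by
  intro cs
  induction cs with
  | nil => intro masks marked f hInv; exact ⟨hInv, rfl⟩
  | cons c cs ih =>
    intro masks marked f hInv
    simp only [List.foldl_cons, pvStepM, pvStepB, pvHitM_eq orig masks marked r c hInv]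
    by_cases hok : pvHitB orig marked r c = true
    · rw [if_pos hok, if_pos hok]
      refine ih _ _ true (pvClearM_inv orig masks marked r c hr hInv ?_)
      rw [pvHitM_eq orig masks marked r c hInv]; exact hok
    · rw [if_neg hok, if_neg hok]
      exact ih masks marked f hInv

lemma pvOuterM_eq (orig : List (List String)) :
    ∀ (rs : List Nat), (∀ r ∈ rs, r + 2 < orig.length) →
    ∀ (masks : List Nat) (marked : PySem.Set (Nat × Nat)) (f : Bool),
      pvMaskInv orig masks marked →
      (rs.foldl (fun st r =>
          (List.range ((orig.getD r []).length - 19)).foldl (pvStepM pvPat r) st)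
        (masks, f)).2 =
      (rs.foldl (fun st r =>
          (List.range ((orig.getD r []).length + 1 - 20)).foldl (pvStepB orig r) st)
        (marked, f)).2 := by
  intro rs
  induction rs with
  | nil => intro _ masks marked f _; rfl
  | cons r rs ih =>
    intro hmem masks marked f hInv
    simp only [List.foldl_cons]
    have hrng : (orig.getD r []).length + 1 - 20 = (orig.getD r []).length - 19 := by omega
    rw [hrng]
    have key := pvInnerM_eq orig r (hmem r (by simp))
      (List.range ((orig.getD r []).length - 19)) masks marked f hInv
    rw [show ((List.range ((orig.getD r []).length - 19)).foldl (pvStepM pvPat r) (masks, f))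
        = (((List.range ((orig.getD r []).length - 19)).foldl (pvStepM pvPat r) (masks, f)).1,
           ((List.range ((orig.getD r []).length - 19)).foldl (pvStepM pvPat r) (masks, f)).2)
      from rfl,
      show ((List.range ((orig.getD r []).length - 19)).foldl (pvStepB orig r) (marked, f))
        = (((List.range ((orig.getD r []).length - 19)).foldl (pvStepB orig r) (marked, f)).1,
           ((List.range ((orig.getD r []).length - 19)).foldl (pvStepB orig r) (marked, f)).2)
      from rfl, key.2]
    exact ih (fun r' hr' => hmem r' (by simp [hr'])) _ _ _ key.1

lemma pvMaskInv_init (grid : List (List String)) :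
    pvMaskInv grid (grid.map pvBits) PySem.Set.empty := by
  constructor
  · simp
  · intro i j
    have hc : PySem.Set.contains PySem.Set.empty ((i, j) : Nat × Nat) = false := by
      simp [PySem.Set.empty, PySem.Set.contains]
    rw [hc]
    simp only [Bool.not_false, Bool.and_true]
    rw [List.getD_eq_getElem?_getD, List.getElem?_map, List.getD_eq_getElem?_getD]
    cases h : grid[i]? with
    | none => simp [h, Nat.zero_testBit]
    | some row => simp [h, testBit_pvBits]

-- ===== VERDICT (by name: the statement is the Claim_ definition above) =====
theorem search_spec : Claim_equal_search := by
  intro grid _ _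
  unfold Spec_search search search_alt
  have hInv : pvInv grid grid PySem.Set.empty := by
    constructor
    · intro i; rfl
    · intro i j; simp [PySem.Set.empty, PySem.Set.contains]
  have hA := pvOuterA_eq grid (grid.length - 2) 0 grid PySem.Set.empty false hInv (by omega)
  have hmem : ∀ r ∈ List.range' 0 (grid.length - 2), r + 2 < grid.length := by
    intro r hr
    have := List.mem_range'.mp hr
    omega
  have hB := pvOuterM_eq grid (List.range' 0 (grid.length - 2)) hmem
    (grid.map pvBits) PySem.Set.empty false (pvMaskInv_init grid)
  rw [hA, List.range_eq_range', hB]
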